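-- pv_equiv track=rewrite | github.com/JoeFarag-00/ETE-Chat | Encryptions/Single-Key/Classical/PlayFair.py | take_each_two
-- ===== SOURCE A (Python) =====
-- def take_each_two(txt):
--     '''
--     This function is for the inner code only. it takes each two charaters in the plain text and group them by the playfair rules.
--     '''
--     temp = []
--     i = 0
--     x = ""
--     for ch in txt:
--         if i == 1:
--             if x != ch:
--                 temp.append(x+ch)
--                 i=-1
--             else:
--                 temp.append( x + "x")
--                 i = 0
--         x = ch
--         i+=1
--     if i == 1:
--         temp.append( x + "x")
--
--     return temp
-- ===== SOURCE B (Python) =====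
-- def take_each_two(txt):
--     '''
--     This function is for the inner code only. it takes each two charaters in the plain text and group them by the playfair rules.
--     '''
--     temp = []
--     i = 0
--     n = len(txt)
--     while i < n:
--         if i + 1 < n and txt[i + 1] != txt[i]:
--             temp.append(txt[i] + txt[i + 1])
--             i += 2
--         else:
--             temp.append(txt[i] + "x")
--             i += 1
--     return temp
-- ===== Notes on version B (the rewrite author's own statement) =====
-- stated objective: simpler
-- what changed: Replaced A's foreach that threads a mutable parity flag i and a previous-char variable x across iterations by a stateless index-driven look-ahead while loop that reads txt[i] and txt[i+1] directly and jumps by 2 (pair) or 1 (pad with 'x' on duplicate or odd tail).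
import Mathlib
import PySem

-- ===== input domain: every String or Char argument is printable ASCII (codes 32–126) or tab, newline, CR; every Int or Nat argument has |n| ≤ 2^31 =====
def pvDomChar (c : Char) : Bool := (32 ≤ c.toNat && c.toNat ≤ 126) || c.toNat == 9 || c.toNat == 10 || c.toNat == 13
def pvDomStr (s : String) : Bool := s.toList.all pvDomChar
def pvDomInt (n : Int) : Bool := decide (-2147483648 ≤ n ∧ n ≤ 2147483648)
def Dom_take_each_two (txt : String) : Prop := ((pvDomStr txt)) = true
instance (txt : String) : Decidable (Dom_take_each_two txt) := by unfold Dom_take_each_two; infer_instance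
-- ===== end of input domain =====

-- B replaces A's stateful parity-flag foreach by an index-driven look-ahead loop (simpler decomposition, same cost).

-- ===== PORT A =====
-- one iteration of A's for-loop: state (temp, i, x)
def pvAStep (s : List String × Int × String) (ch : Char) : List String × Int × String :=
  let (temp, i, x) := s
  let (temp, i) :=
    if i = 1 then
      if x ≠ String.ofList [ch] then (temp ++ [x ++ String.ofList [ch]], (-1 : Int))
      else (temp ++ [x ++ "x"], (0 : Int))
    else (temp, i)
  (temp, i + 1, String.ofList [ch])

def take_each_two (txt : String) : List String :=
  let s := txt.toList.foldl pvAStep ([], (0 : Int), "")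
  if s.2.1 = 1 then s.1 ++ [s.2.2 ++ "x"] else s.1

-- ===== PORT B =====
-- B's look-ahead while loop over an index, transcribed as structural recursion on the remaining suffix of the text (index i ↦ suffix drop i)
def pvBAux : List Char → List String
  | [] => []
  | [a] => [String.ofList [a, 'x']]
  | a :: b :: rest =>
    if b = a then String.ofList [a, 'x'] :: pvBAux (b :: rest)
    else String.ofList [a, b] :: pvBAux rest

def take_each_two_alt (txt : String) : List String := pvBAux txt.toList

-- ===== PRECONDITION & SPEC =====
def Spec_take_each_two (txt : String) (out : List String) : Prop := out = take_each_two_alt txt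
instance (txt : String) (out : List String) : Decidable (Spec_take_each_two txt out) := by unfold Spec_take_each_two; infer_instance

-- ===== CLAIM (what is proved, stated in full; the proofs are below) =====
def Claim_equal_take_each_two : Prop := ∀ (txt : String), Dom_take_each_two txt → Spec_take_each_two txt (take_each_two txt)

-- ===== LEMMAS AND PROOFS =====
def pvFinish (s : List String × Int × String) : List String :=
  if s.2.1 = 1 then s.1 ++ [s.2.2 ++ "x"] else s.1

theorem pvMkAppX (c : Char) : String.ofList [c] ++ "x" = String.ofList [c, 'x'] := by
  apply String.ext; simp [String.toList_append]

theorem pvMkApp (c d : Char) : String.ofList [c] ++ String.ofList [d] = String.ofList [c, d] := by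
  apply String.ext; simp [String.toList_append]

theorem pvMkInj (c d : Char) (h : String.ofList [c] = String.ofList [d]) : c = d := by
  have := congrArg String.toList h; simpa using this

theorem pvKey : ∀ (l : List Char),
    (∀ (temp : List String) (x : String),
      pvFinish (l.foldl pvAStep (temp, (0 : Int), x)) = temp ++ pvBAux l) ∧
    (∀ (temp : List String) (c : Char),
      pvFinish (l.foldl pvAStep (temp, (1 : Int), String.ofList [c])) = temp ++ pvBAux (c :: l)) := by
  intro l
  induction l with
  | nil =>
    constructor
    · intro temp x; simp [pvFinish, pvBAux]
    · intro temp c; simp [pvFinish, pvBAux, pvMkAppX]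
  | cons ch rest ih =>
    constructor
    · intro temp x
      have hstep : pvAStep (temp, (0 : Int), x) ch = (temp, (1 : Int), String.ofList [ch]) := by
        simp [pvAStep]
      rw [List.foldl_cons, hstep, ih.2]
    · intro temp c
      by_cases h : c = ch
      · subst h
        have hstep : pvAStep (temp, (1 : Int), String.ofList [c]) c
            = (temp ++ [String.ofList [c] ++ "x"], (1 : Int), String.ofList [c]) := by
          simp [pvAStep]
        rw [List.foldl_cons, hstep, ih.2]
        simp [pvBAux, pvMkAppX]
      · have hm : String.ofList [c] ≠ String.ofList [ch] := fun he => h (pvMkInj _ _ he)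
        have hstep : pvAStep (temp, (1 : Int), String.ofList [c]) ch
            = (temp ++ [String.ofList [c] ++ String.ofList [ch]], (0 : Int), String.ofList [ch]) := by
          simp [pvAStep, hm]
        rw [List.foldl_cons, hstep, ih.1]
        simp [pvBAux, Ne.symm h, pvMkApp]

-- ===== VERDICT (by name: the statement is the Claim_ definition above) =====
theorem take_each_two_spec : Claim_equal_take_each_two := by
  intro txt _
  unfold Spec_take_each_two take_each_two take_each_two_alt
  exact (pvKey txt.toList).1 [] ""
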